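-- pv_equiv track=rewrite | github.com/vkhangpham/timeline-segmentation | validation/validation_framework.py | _analyze_temporal_coverage
-- ===== SOURCE A (Python) =====
-- from typing import Dict, List, Any, Tuple, Optional
--
-- def _analyze_temporal_coverage(ground_truth: Dict[str, Any]) -> Dict[str, Any]:
--     """Analyze temporal coverage of ground truth data."""
--     periods = ground_truth.get('historical_periods', [])
--
--     if not periods:
--         return {'min_year': None, 'max_year': None, 'total_years': 0}
--
--     years = []
--     for period in periods:
--         if period.get('start_year'):
--             years.append(period['start_year'])
--         if period.get('end_year'):
--             years.append(period['end_year'])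
--
--     return {
--         'min_year': min(years) if years else None,
--         'max_year': max(years) if years else None,
--         'total_years': max(years) - min(years) if years else 0,
--         'period_count': len(periods)
--     }
-- ===== SOURCE B (Python) =====
-- def _analyze_temporal_coverage(ground_truth):
--     """Analyze temporal coverage of ground truth data (single-pass running min/max)."""
--     periods = ground_truth.get('historical_periods', [])
--
--     if not periods:
--         return {'min_year': None, 'max_year': None, 'total_years': 0}
--
--     lo = None
--     hi = None
--     for period in periods:
--         for key in ('start_year', 'end_year'):
--             y = period.get(key)
--             if y:
--                 lo = y if lo is None or y < lo else lo
--                 hi = y if hi is None or hi < y else hi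
--
--     return {
--         'min_year': lo,
--         'max_year': hi,
--         'total_years': hi - lo if lo is not None else 0,
--         'period_count': len(periods),
--     }
-- ===== Notes on version B (the rewrite author's own statement) =====
-- stated objective: alternative
-- what changed: Replaces building an intermediate years list followed by separate min()/max() passes with a single pass that maintains running lo/hi aggregates (no intermediate list).
import Mathlib
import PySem

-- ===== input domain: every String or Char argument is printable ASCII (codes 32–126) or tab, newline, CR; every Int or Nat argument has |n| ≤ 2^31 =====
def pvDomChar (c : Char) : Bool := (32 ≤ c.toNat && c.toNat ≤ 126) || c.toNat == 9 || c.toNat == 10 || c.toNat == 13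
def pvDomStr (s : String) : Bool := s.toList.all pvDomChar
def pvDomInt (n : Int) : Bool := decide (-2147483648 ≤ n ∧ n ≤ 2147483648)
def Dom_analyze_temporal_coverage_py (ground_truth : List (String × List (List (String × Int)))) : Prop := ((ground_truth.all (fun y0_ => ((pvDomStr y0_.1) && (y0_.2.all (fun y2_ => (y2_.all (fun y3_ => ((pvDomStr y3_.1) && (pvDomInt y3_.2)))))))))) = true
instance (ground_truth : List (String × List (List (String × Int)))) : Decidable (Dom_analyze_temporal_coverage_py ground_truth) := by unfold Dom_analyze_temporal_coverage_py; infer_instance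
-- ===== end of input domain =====

-- B replaces A's intermediate years list + separate min()/max() passes by one pass keeping running lo/hi (alternative decomposition, same cost class).

-- ===== PORT A =====
-- one period's two truthiness-guarded appends (years += start_year?, years += end_year?)
def pvAYearsStep (ys : List Int) (period : List (String × Int)) : List Int :=
  let ys1 := match (PySem.Dict.mk period).get? "start_year" with
    | some v => if v ≠ 0 then ys ++ [v] else ys   -- if period.get('start_year'): years.append(period['start_year'])
    | none => ys
  match (PySem.Dict.mk period).get? "end_year" with
    | some v => if v ≠ 0 then ys1 ++ [v] else ys1
    | none => ys1

def analyze_temporal_coverage_py (ground_truth : List (String × List (List (String × Int)))) : List (String × Option Int) :=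
  let periods := PySem.Dict.getD (PySem.Dict.mk ground_truth) "historical_periods" []
  if periods = [] then
    [("min_year", none), ("max_year", none), ("total_years", some 0)]
  else
    let years := periods.foldl pvAYearsStep []
    -- min(years)/max(years) are guarded by 'if years'; .getD 0 only totalizes the nonempty case
    [("min_year", if years = [] then none else PySem.List.min? years (fun x => x)),
     ("max_year", if years = [] then none else PySem.List.max? years (fun x => x)),
     ("total_years", some (if years = [] then 0 else
        ((PySem.List.max? years (fun x => x)).getD 0 - (PySem.List.min? years (fun x => x)).getD 0))),
     ("period_count", some (periods.length : Int))]

-- ===== PORT B =====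
-- 'y = period.get(key); if y: lo = y if lo is None or y < lo else lo; hi = ...'
def pvBUpd (acc : Option Int × Option Int) (yo : Option Int) : Option Int × Option Int :=
  match yo with
  | none => acc
  | some y =>
    if y ≠ 0 then
      ((match acc.1 with | none => some y | some m => if y < m then some y else some m),
       (match acc.2 with | none => some y | some M => if M < y then some y else some M))
    else acc

-- the inner 'for key in ('start_year', 'end_year')' loop unrolled over one period
def pvBStep (acc : Option Int × Option Int) (period : List (String × Int)) : Option Int × Option Int :=
  pvBUpd (pvBUpd acc ((PySem.Dict.mk period).get? "start_year")) ((PySem.Dict.mk period).get? "end_year")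

def analyze_temporal_coverage_py_alt (ground_truth : List (String × List (List (String × Int)))) : List (String × Option Int) :=
  let periods := PySem.Dict.getD (PySem.Dict.mk ground_truth) "historical_periods" []
  if periods = [] then
    [("min_year", none), ("max_year", none), ("total_years", some 0)]
  else
    let lohi := periods.foldl pvBStep (none, none)
    -- 'hi - lo if lo is not None else 0'; when lo is some, hi is some too, so .getD 0 only totalizes
    [("min_year", lohi.1),
     ("max_year", lohi.2),
     ("total_years", some (match lohi.1 with | none => 0 | some m => lohi.2.getD 0 - m)),
     ("period_count", some (periods.length : Int))]

-- ===== PRECONDITION & SPEC =====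
def Spec_analyze_temporal_coverage_py (ground_truth : List (String × List (List (String × Int)))) (out : List (String × Option Int)) : Prop := out = analyze_temporal_coverage_py_alt ground_truth
instance (ground_truth : List (String × List (List (String × Int)))) (out : List (String × Option Int)) : Decidable (Spec_analyze_temporal_coverage_py ground_truth out) := by unfold Spec_analyze_temporal_coverage_py; infer_instance

-- ===== CLAIM (what is proved, stated in full; the proofs are below) =====
def Claim_equal_analyze_temporal_coverage_py : Prop := ∀ (ground_truth : List (String × List (List (String × Int)))), Dom_analyze_temporal_coverage_py ground_truth → Spec_analyze_temporal_coverage_py ground_truth (analyze_temporal_coverage_py ground_truth)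

-- ===== LEMMAS AND PROOFS =====

-- min?/max? over an appended singleton, split on the running state
theorem pv_min_append_none (ys : List Int) (v : Int)
    (h : PySem.List.min? ys (fun x => x) = none) :
    PySem.List.min? (ys ++ [v]) (fun x => x) = some v := by
  simp only [PySem.List.min?] at h ⊢
  rw [List.foldl_append, h]
  rfl

theorem pv_min_append_some (ys : List Int) (v m : Int)
    (h : PySem.List.min? ys (fun x => x) = some m) :
    PySem.List.min? (ys ++ [v]) (fun x => x) = if v < m then some v else some m := by
  simp only [PySem.List.min?] at h ⊢
  rw [List.foldl_append, h]
  rfl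

theorem pv_max_append_none (ys : List Int) (v : Int)
    (h : PySem.List.max? ys (fun x => x) = none) :
    PySem.List.max? (ys ++ [v]) (fun x => x) = some v := by
  simp only [PySem.List.max?] at h ⊢
  rw [List.foldl_append, h]
  rfl

theorem pv_max_append_some (ys : List Int) (v M : Int)
    (h : PySem.List.max? ys (fun x => x) = some M) :
    PySem.List.max? (ys ++ [v]) (fun x => x) = if M < v then some v else some M := by
  simp only [PySem.List.max?] at h ⊢
  rw [List.foldl_append, h]
  rfl

-- one optional-year update preserves the lo/hi ↔ min?/max? correspondence
theorem pv_upd_corr (ys : List Int) (yo : Option Int) :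
    pvBUpd (PySem.List.min? ys (fun x => x), PySem.List.max? ys (fun x => x)) yo
      = (PySem.List.min? ((match yo with | some v => if v ≠ 0 then ys ++ [v] else ys | none => ys)) (fun x => x),
         PySem.List.max? ((match yo with | some v => if v ≠ 0 then ys ++ [v] else ys | none => ys)) (fun x => x)) := by
  cases yo with
  | none => rfl
  | some v =>
    by_cases hv : v ≠ 0
    · simp only [hv, if_true, ne_eq, not_false_eq_true]
      cases hm : PySem.List.min? ys (fun x => x) with
      | none =>
        cases hM : PySem.List.max? ys (fun x => x) with
        | none =>
          simp [pvBUpd, hv, pv_min_append_none ys v hm, pv_max_append_none ys v hM]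
        | some M =>
          simp [pvBUpd, hv, pv_min_append_none ys v hm, pv_max_append_some ys v M hM]
      | some m =>
        cases hM : PySem.List.max? ys (fun x => x) with
        | none =>
          simp [pvBUpd, hv, pv_min_append_some ys v m hm, pv_max_append_none ys v hM]
        | some M =>
          simp [pvBUpd, hv, pv_min_append_some ys v m hm, pv_max_append_some ys v M hM]
    · simp [pvBUpd, hv]

-- the fold invariant: B's running (lo, hi) is exactly (min?, max?) of A's accumulated years list
theorem pv_fold_corr (periods : List (List (String × Int))) :
    ∀ ys : List Int,
      periods.foldl pvBStep (PySem.List.min? ys (fun x => x), PySem.List.max? ys (fun x => x))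
        = (PySem.List.min? (periods.foldl pvAYearsStep ys) (fun x => x),
           PySem.List.max? (periods.foldl pvAYearsStep ys) (fun x => x)) := by
  induction periods with
  | nil => intro ys; rfl
  | cons p rest ih =>
    intro ys
    have hstep : pvBStep (PySem.List.min? ys (fun x => x), PySem.List.max? ys (fun x => x)) p
        = (PySem.List.min? (pvAYearsStep ys p) (fun x => x),
           PySem.List.max? (pvAYearsStep ys p) (fun x => x)) := by
      unfold pvBStep pvAYearsStep
      rw [pv_upd_corr, pv_upd_corr]
    rw [List.foldl_cons, List.foldl_cons, hstep, ih]

-- ===== VERDICT (by name: the statement is the Claim_ definition above) =====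
theorem analyze_temporal_coverage_py_spec : Claim_equal_analyze_temporal_coverage_py := by
  intro gt _
  unfold Spec_analyze_temporal_coverage_py analyze_temporal_coverage_py analyze_temporal_coverage_py_alt
  set periods := PySem.Dict.getD (PySem.Dict.mk gt) "historical_periods" [] with hp
  by_cases h : periods = []
  · simp [h]
  · simp only [h, if_false]
    have hc : List.foldl pvBStep (none, none) periods
        = (PySem.List.min? (periods.foldl pvAYearsStep []) (fun x => x),
           PySem.List.max? (periods.foldl pvAYearsStep []) (fun x => x)) :=
      pv_fold_corr periods []
    rw [hc]
    cases hys : periods.foldl pvAYearsStep [] with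
    | nil => simp [PySem.List.min?, PySem.List.max?]
    | cons y t =>
      rw [PySem.List.min?_id_cons, PySem.List.max?_id_cons]
      simp
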